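-- pv_equiv track=rewrite | github.com/gorodnichy/IVI-Tools | docx_pdf_booklet_4up_ivim_app050.py | _sides_4up_cut_middle_user_scheme
-- ===== SOURCE A (Python) =====
-- def _next_multiple(intN: int, intK: int) -> int:
--     return ((intN + intK - 1) // intK) * intK
--
-- def _as_real_or_blank(intP: int | None, intRealPages: int) -> int | None:
--     if intP is None:
--         return None
--     return intP if 1 <= intP <= intRealPages else None
--
-- def _sides_4up_cut_middle_user_scheme(intRealPages: int) -> list[tuple[int | None, int | None, int | None, int | None]]:
--     """
--     Each OUTPUT PDF page corresponds to one printed SIDE and has 4 slots: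
--       (top-left, top-right, bottom-left, bottom-right)
--
--     Pads to nearest multiple of 8 pages (by blanks), then:
--       Page 1: (last,1) and (last-2,3)
--       Page 2: (2,last-1) and (4,last-3)
--       then repeats with 4-page stride on the small numbers, 4-page stride down on the big numbers.
--     """
--     intTotal = _next_multiple(intRealPages, 8)
--     intBlocks = intTotal // 8
--     vecSides: list[tuple[int | None, int | None, int | None, int | None]] = []
--
--     for i in range(intBlocks):
--         a = intTotal - 4 * i
--         front = (
--             _as_real_or_blank(a, intRealPages),
--             _as_real_or_blank(1 + 4 * i, intRealPages),
--             _as_real_or_blank(a - 2, intRealPages),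
--             _as_real_or_blank(3 + 4 * i, intRealPages),
--         )
--         back = (
--             _as_real_or_blank(2 + 4 * i, intRealPages),
--             _as_real_or_blank(a - 1, intRealPages),
--             _as_real_or_blank(4 + 4 * i, intRealPages),
--             _as_real_or_blank(a - 3, intRealPages),
--         )
--         vecSides.append(front)
--         vecSides.append(back)
--
--     return vecSides
-- ===== SOURCE B (Python) =====
-- def _sides_4up_cut_middle_user_scheme(intRealPages):
--     intTotal = -(-intRealPages // 8) * 8  # pad up to a multiple of 8
--
--     def clamp(p):
--         return p if 1 <= p <= intRealPages else None
--
--     # two woven page counters, built up front: the ascending half and the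
--     # descending half of the padded book
--     small = list(range(1, intTotal // 2 + 1))
--     big = list(range(intTotal, intTotal // 2, -1))
--
--     vecSides = []
--     pairs = zip(small, big)
--     for (s1, b1), (s2, b2), (s3, b3), (s4, b4) in zip(*[pairs] * 4):
--         vecSides.append((clamp(b1), clamp(s1), clamp(b3), clamp(s3)))
--         vecSides.append((clamp(s2), clamp(b2), clamp(s4), clamp(b4)))
--     return vecSides
-- ===== Notes on version B (the rewrite author's own statement) =====
-- stated objective: alternative
-- what changed: Instead of per-block index arithmetic (a = intTotal-4*i with eight offset formulas), B builds the ascending and descending halves of the padded page sequence up front, zips them into one pair stream and consumes four pairs per printed side pair, weaving each chunk into the front/back tuples.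
import Mathlib
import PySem

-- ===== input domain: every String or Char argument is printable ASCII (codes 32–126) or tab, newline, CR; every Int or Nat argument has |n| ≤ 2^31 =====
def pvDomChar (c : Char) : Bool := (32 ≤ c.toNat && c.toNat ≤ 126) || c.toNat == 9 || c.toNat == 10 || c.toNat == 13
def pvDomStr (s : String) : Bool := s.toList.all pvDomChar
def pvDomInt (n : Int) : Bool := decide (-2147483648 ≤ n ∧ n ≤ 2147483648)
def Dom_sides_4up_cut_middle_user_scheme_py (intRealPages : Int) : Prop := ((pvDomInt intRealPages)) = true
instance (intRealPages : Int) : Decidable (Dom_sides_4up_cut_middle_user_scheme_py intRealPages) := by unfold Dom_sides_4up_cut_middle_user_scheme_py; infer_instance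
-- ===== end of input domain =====

-- B replaces A's per-block index arithmetic by weaving two precomputed page streams
-- (ascending and descending halves of the padded book), consumed four pages at a time;
-- an alternative decomposition of the same cost, proved to return the same list.


-- ===== PORT A =====
def pvNextMultiple (intN intK : Int) : Int :=
  (PySem.Int.floordiv (intN + intK - 1) intK) * intK

def pvAsRealOrBlank (intP : Option Int) (intRealPages : Int) : Option Int :=
  match intP with
  | none => none
  | some p => if 1 ≤ p ∧ p ≤ intRealPages then some p else none

def sides_4up_cut_middle_user_scheme_py (intRealPages : Int) :
    List (Option Int × Option Int × Option Int × Option Int) :=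
  let intTotal := pvNextMultiple intRealPages 8
  let intBlocks := PySem.Int.floordiv intTotal 8
  (PySem.List.pyRange 0 intBlocks 1).foldl
    (fun acc i =>
      let a := intTotal - 4 * i
      let front := (pvAsRealOrBlank (some a) intRealPages,
                    pvAsRealOrBlank (some (1 + 4 * i)) intRealPages,
                    pvAsRealOrBlank (some (a - 2)) intRealPages,
                    pvAsRealOrBlank (some (3 + 4 * i)) intRealPages)
      let back := (pvAsRealOrBlank (some (2 + 4 * i)) intRealPages,
                   pvAsRealOrBlank (some (a - 1)) intRealPages,
                   pvAsRealOrBlank (some (4 + 4 * i)) intRealPages,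
                   pvAsRealOrBlank (some (a - 3)) intRealPages)
      (acc ++ [front]) ++ [back]) []

-- ===== PORT B =====
def pvClamp (intRealPages p : Int) : Option Int :=
  if 1 ≤ p ∧ p ≤ intRealPages then some p else none

-- the for loop of Source B: zip(*[pairs]*4) hands over four (small, big) pairs per
-- printed side pair, appending the woven front/back tuples to vecSides
def pvWeave (intRealPages : Int) :
    List (Int × Int) → List (Option Int × Option Int × Option Int × Option Int) →
    List (Option Int × Option Int × Option Int × Option Int)
  | (s1, b1) :: (s2, b2) :: (s3, b3) :: (s4, b4) :: rest, vecSides =>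
      pvWeave intRealPages rest
        ((vecSides ++ [(pvClamp intRealPages b1, pvClamp intRealPages s1,
                        pvClamp intRealPages b3, pvClamp intRealPages s3)]) ++
         [(pvClamp intRealPages s2, pvClamp intRealPages b2,
           pvClamp intRealPages s4, pvClamp intRealPages b4)])
  | _, vecSides => vecSides

def sides_4up_cut_middle_user_scheme_py_alt (intRealPages : Int) :
    List (Option Int × Option Int × Option Int × Option Int) :=
  let intTotal := -(PySem.Int.floordiv (-intRealPages) 8) * 8
  let half := PySem.Int.floordiv intTotal 2
  let small := PySem.List.pyRange 1 (half + 1) 1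
  let big := PySem.List.pyRange intTotal half (-1)
  pvWeave intRealPages (small.zip big) []

-- ===== PRECONDITION & SPEC =====
def Spec_sides_4up_cut_middle_user_scheme_py (intRealPages : Int) (out : List (Option Int × Option Int × Option Int × Option Int)) : Prop := out = sides_4up_cut_middle_user_scheme_py_alt intRealPages
instance (intRealPages : Int) (out : List (Option Int × Option Int × Option Int × Option Int)) : Decidable (Spec_sides_4up_cut_middle_user_scheme_py intRealPages out) := by unfold Spec_sides_4up_cut_middle_user_scheme_py; infer_instance

-- ===== CLAIM (what is proved, stated in full; the proofs are below) =====
def Claim_equal_sides_4up_cut_middle_user_scheme_py : Prop := ∀ (intRealPages : Int), Dom_sides_4up_cut_middle_user_scheme_py intRealPages → Spec_sides_4up_cut_middle_user_scheme_py intRealPages (sides_4up_cut_middle_user_scheme_py intRealPages)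

-- ===== LEMMAS AND PROOFS =====

lemma pvClamp_eq (r p : Int) : pvClamp r p = pvAsRealOrBlank (some p) r := rfl

-- the heart: weaving the two streams equals A's block fold, for any block offset
lemma pvWeave_eq_foldl (r T : Int) (k : Nat) : ∀ (off : Int)
    (out : List (Option Int × Option Int × Option Int × Option Int)),
    pvWeave r ((PySem.List.pyRange (4 * off + 1) (4 * off + 1 + 4 * (k : Int)) 1).zip
               (PySem.List.pyRange (T - 4 * off) (T - 4 * off - 4 * (k : Int)) (-1))) out
    = (PySem.List.pyRange off (off + (k : Int)) 1).foldl
        (fun acc i =>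
          (acc ++ [(pvAsRealOrBlank (some (T - 4 * i)) r,
                    pvAsRealOrBlank (some (1 + 4 * i)) r,
                    pvAsRealOrBlank (some (T - 4 * i - 2)) r,
                    pvAsRealOrBlank (some (3 + 4 * i)) r)]) ++
          [(pvAsRealOrBlank (some (2 + 4 * i)) r,
            pvAsRealOrBlank (some (T - 4 * i - 1)) r,
            pvAsRealOrBlank (some (4 + 4 * i)) r,
            pvAsRealOrBlank (some (T - 4 * i - 3)) r)]) out := by
  induction k with
  | zero =>
      intro off out
      rw [PySem.List.pyRange_one_eq_nil (by omega),
          PySem.List.pyRange_one_eq_nil (by omega)]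
      simp [pvWeave]
  | succ k ih =>
      intro off out
      rw [PySem.List.pyRange_one_cons (a := 4 * off + 1) (by push_cast; omega),
          PySem.List.pyRange_one_cons (a := 4 * off + 1 + 1) (by push_cast; omega),
          PySem.List.pyRange_one_cons (a := 4 * off + 1 + 1 + 1) (by push_cast; omega),
          PySem.List.pyRange_one_cons (a := 4 * off + 1 + 1 + 1 + 1) (by push_cast; omega),
          PySem.List.pyRange_neg_one_cons (a := T - 4 * off) (by push_cast; omega),
          PySem.List.pyRange_neg_one_cons (a := T - 4 * off - 1) (by push_cast; omega),
          PySem.List.pyRange_neg_one_cons (a := T - 4 * off - 1 - 1) (by push_cast; omega),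
          PySem.List.pyRange_neg_one_cons (a := T - 4 * off - 1 - 1 - 1) (by push_cast; omega),
          PySem.List.pyRange_one_cons (a := off) (by push_cast; omega)]
      simp only [List.zip_cons_cons]
      rw [pvWeave]
      have hs : (4 * off + 1 + 1 + 1 + 1 + 1 : Int) = 4 * (off + 1) + 1 := by ring
      have hs2 : (4 * off + 1 + 4 * ((k : Int) + 1) : Int) = 4 * (off + 1) + 1 + 4 * (k : Int) := by ring
      have hb : (T - 4 * off - 1 - 1 - 1 - 1 : Int) = T - 4 * (off + 1) := by ring
      have hb2 : (T - 4 * off - 4 * ((k : Int) + 1) : Int) = T - 4 * (off + 1) - 4 * (k : Int) := by ring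
      push_cast
      push_cast at hs2 hb2
      rw [hs, hs2, hb, hb2, ih (off + 1)]
      have hr : (off + 1 + (k : Int)) = off + ((k : Int) + 1) := by ring
      rw [List.foldl_cons, ← hr]
      congr 1
      ring_nf
      simp only [pvClamp_eq]

-- ===== VERDICT (by name: the statement is the Claim_ definition above) =====
theorem sides_4up_cut_middle_user_scheme_py_spec : Claim_equal_sides_4up_cut_middle_user_scheme_py := by
  intro r _
  unfold Spec_sides_4up_cut_middle_user_scheme_py
  unfold sides_4up_cut_middle_user_scheme_py sides_4up_cut_middle_user_scheme_py_alt
  simp only [pvNextMultiple]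
  have hTeq : PySem.Int.floordiv (r + 8 - 1) 8 * 8 = -PySem.Int.floordiv (-r) 8 * 8 := by
    rw [PySem.Int.floordiv_eq_ediv_of_pos (by omega : (0:Int) < 8),
        PySem.Int.floordiv_eq_ediv_of_pos (by omega : (0:Int) < 8)]
    omega
  set B := PySem.Int.floordiv (r + 8 - 1) 8 with hB
  rw [← hTeq]
  have hblocks : PySem.Int.floordiv (B * 8) 8 = B := by
    rw [PySem.Int.floordiv_eq_ediv_of_pos (by omega : (0:Int) < 8)]; omega
  have hhalf : PySem.Int.floordiv (B * 8) 2 = 4 * B := by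
    rw [PySem.Int.floordiv_eq_ediv_of_pos (by omega : (0:Int) < 2)]; omega
  rw [hblocks, hhalf]
  rcases (by omega : B ≤ 0 ∨ 0 < B) with hB0 | hB0
  · rw [PySem.List.pyRange_one_eq_nil hB0,
        PySem.List.pyRange_one_eq_nil (by omega : (4 * B + 1 : Int) ≤ 1)]
    simp [pvWeave]
  · obtain ⟨k, hk⟩ : ∃ k : Nat, B = (k : Int) :=
      ⟨B.toNat, (Int.toNat_of_nonneg hB0.le).symm⟩
    have hmain := pvWeave_eq_foldl r (B * 8) k 0 []
    have e1 : (4 * (0:Int) + 1) = 1 := by ring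
    have e2 : ((1:Int) + 4 * (k:Int)) = 4 * B + 1 := by rw [hk]; ring
    have e3 : (B * 8 - 4 * (0:Int)) = B * 8 := by ring
    rw [e1, e3] at hmain
    have e5 : ((0:Int) + (k:Int)) = B := by rw [hk]; ring
    rw [e2, e5] at hmain
    rw [(by rw [hk]; ring : (B * 8 - 4 * (k:Int)) = 4 * B)] at hmain
    exact hmain.symm
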